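-- pv_equiv track=rewrite | github.com/licsky/checkio | O`Reilly/cipherMap.py | recall_password
-- ===== SOURCE A (Python) =====
-- def recall_password(cipher_grille, ciphered_password):
--     x = cipher_grille
--     y = ciphered_password
--     temp = 0
--     l = ''
--     for o in range(4):
--         for i in range(4):
--             for u in range(4):
--                 if x[i][u] == 'X':
--                     l = l + (y[i][u])
--         x = list(zip(*x[::-1]))
--     return l
-- ===== SOURCE B (Python) =====
-- def recall_password(cipher_grille, ciphered_password):
--     # Never rotates the grille: reads the original grille at coordinates
--     # obtained by unwinding k clockwise rotations (heights h0, h1 alternate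
--     # because each rotation of an n x m grid yields an m x n grid).
--     x, y = cipher_grille, ciphered_password
--     h0 = len(x)
--     h1 = min(len(r) for r in x)
--     heights = [h0, h1, h0]
--     out = ''
--     for k in range(4):
--         for i in range(4):
--             for u in range(4):
--                 a, b = i, u
--                 for h in reversed(heights[:k]):
--                     a, b = h - 1 - b, a
--                 if x[a][b] == 'X':
--                     out += y[i][u]
--     return out
-- ===== Notes on version B (the rewrite author's own statement) =====
-- stated objective: alternative
-- what changed: B never builds rotated copies of the grille (A recomputes list(zip(*x[::-1])) each round): it reads the original grille through the coordinate pre-image map of k clockwise rotations, maintained with the two alternating grid heights (constant-factor saving: no per-round rotated copies).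
import Mathlib
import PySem

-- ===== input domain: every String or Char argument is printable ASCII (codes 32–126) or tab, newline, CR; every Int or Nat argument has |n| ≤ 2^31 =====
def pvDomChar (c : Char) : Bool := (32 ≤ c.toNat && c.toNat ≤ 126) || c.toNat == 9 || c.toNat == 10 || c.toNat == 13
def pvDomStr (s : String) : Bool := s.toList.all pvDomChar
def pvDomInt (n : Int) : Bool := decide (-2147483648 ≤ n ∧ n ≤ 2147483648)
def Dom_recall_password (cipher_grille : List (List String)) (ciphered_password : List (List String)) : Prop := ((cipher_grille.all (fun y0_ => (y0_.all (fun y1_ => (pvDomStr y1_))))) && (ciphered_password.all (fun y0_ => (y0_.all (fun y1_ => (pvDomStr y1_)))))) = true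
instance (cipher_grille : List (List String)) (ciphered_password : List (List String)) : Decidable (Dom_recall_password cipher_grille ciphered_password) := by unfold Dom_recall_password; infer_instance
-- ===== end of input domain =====

-- B never builds rotated copies of the grille: it reads the original grille through
-- coordinate pre-image maps of the clockwise rotation (alternative decomposition, same cost).

-- `min(len(r) for r in x)` (0 is a placeholder for the empty list, on which Python's min raises; excluded by Pre_)
def pvMinLen : List (List String) → Nat
  | [] => 0
  | r :: rs => rs.foldl (fun m row => min m row.length) r.length

-- ===== PORT A =====
-- models Python's `list(zip(*rows))`: truncating transpose (row j of the result collects entry j of every row)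
def pyZipStar (rows : List (List String)) : List (List String) :=
  (List.range (pvMinLen rows)).map (fun j => rows.map (fun row => row.getD j ""))

-- models `x = list(zip(*x[::-1]))` (clockwise rotation)
def rotA (g : List (List String)) : List (List String) := pyZipStar g.reverse

-- indexing x[i][u] / y[i][u] is ported with getD; Pre_ guarantees every access is in range
def recall_password (cipher_grille : List (List String)) (ciphered_password : List (List String)) : String :=
  ((List.range 4).foldl
    (fun (st : List (List String) × String) _o =>
      (rotA st.1,
        (List.range 4).foldl (fun l i =>
          (List.range 4).foldl (fun l u =>
            if ((st.1.getD i []).getD u "") == "X" then l ++ ((ciphered_password.getD i []).getD u "") else l) l) st.2))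
    (cipher_grille, "")).2

-- ===== PORT B =====
def recall_password_alt (cipher_grille : List (List String)) (ciphered_password : List (List String)) : String :=
  let h0 := cipher_grille.length
  let h1 := pvMinLen cipher_grille
  let heights := [h0, h1, h0]
  (List.range 4).foldl (fun out k =>
    (List.range 4).foldl (fun out i =>
      (List.range 4).foldl (fun out u =>
        let ab := ((heights.take k).reverse).foldl (fun (ab : Nat × Nat) h => (h - 1 - ab.2, ab.1)) (i, u)
        if ((cipher_grille.getD ab.1 []).getD ab.2 "") == "X" then out ++ ((ciphered_password.getD i []).getD u "") else out)
        out) out) ""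

-- ===== PRECONDITION & SPEC =====
-- Exactly the inputs on which A returns: the grille must admit all four rotations with
-- indices 0..3 in range (≥ 4 rows, every row ≥ 4 long), and the password grid must have a
-- cell (i,u) wherever some rotation of the grille carries an 'X' at (i,u); the four listed
-- grille cells are the pre-images of (i,u) under 0..3 clockwise rotations.
def Pre_recall_password (cipher_grille : List (List String)) (ciphered_password : List (List String)) : Prop :=
  4 ≤ cipher_grille.length ∧ (∀ r ∈ cipher_grille, 4 ≤ r.length) ∧
  (∀ i < 4, ∀ u < 4,
    (((cipher_grille.getD i []).getD u "" = "X") ∨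
     ((cipher_grille.getD (cipher_grille.length - 1 - u) []).getD i "" = "X") ∨
     ((cipher_grille.getD (cipher_grille.length - 1 - i) []).getD (pvMinLen cipher_grille - 1 - u) "" = "X") ∨
     ((cipher_grille.getD u []).getD (pvMinLen cipher_grille - 1 - i) "" = "X"))
    → i < ciphered_password.length ∧ u < (ciphered_password.getD i []).length)
instance (cipher_grille : List (List String)) (ciphered_password : List (List String)) : Decidable (Pre_recall_password cipher_grille ciphered_password) := by unfold Pre_recall_password; infer_instance

def pvWitness_recall_password : List (List String) × List (List String) :=
  ([["X", ".", ".", "."], [".", ".", "X", "."], [".", ".", ".", "."], [".", ".", ".", "X"]],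
   [["a", "b", "c", "d"], ["e", "f", "g", "h"], ["i", "j", "k", "l"], ["m", "n", "o", "p"]])

def Spec_recall_password (cipher_grille : List (List String)) (ciphered_password : List (List String)) (out : String) : Prop := out = recall_password_alt cipher_grille ciphered_password
instance (cipher_grille : List (List String)) (ciphered_password : List (List String)) (out : String) : Decidable (Spec_recall_password cipher_grille ciphered_password out) := by unfold Spec_recall_password; infer_instance

-- ===== CLAIM (what is proved, stated in full; the proofs are below) =====
def Claim_equal_recall_password : Prop := ∀ (cipher_grille : List (List String)) (ciphered_password : List (List String)), Dom_recall_password cipher_grille ciphered_password → Pre_recall_password cipher_grille ciphered_password → Spec_recall_password cipher_grille ciphered_password (recall_password cipher_grille ciphered_password)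

-- ===== LEMMAS AND PROOFS =====

-- facts about the folded minimum
theorem pvFoldMin_le_init (rs : List (List String)) : ∀ a : Nat, rs.foldl (fun m row => min m row.length) a ≤ a := by
  induction rs with
  | nil => intro a; simp
  | cons hd tl ih =>
    intro a
    calc tl.foldl (fun m row => min m row.length) (min a hd.length) ≤ min a hd.length := ih _
      _ ≤ a := Nat.min_le_left _ _

theorem pvFoldMin_le_mem (rs : List (List String)) : ∀ a : Nat, ∀ r ∈ rs, rs.foldl (fun m row => min m row.length) a ≤ r.length := by
  induction rs with
  | nil => intro a r hr; cases hr
  | cons hd tl ih =>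
    intro a r hr
    rcases List.mem_cons.mp hr with h | h
    · subst h
      calc tl.foldl (fun m row => min m row.length) (min a r.length) ≤ min a r.length := pvFoldMin_le_init _ _
        _ ≤ r.length := Nat.min_le_right _ _
    · exact ih _ r h

theorem pvFoldMin_ge (rs : List (List String)) : ∀ a n : Nat, n ≤ a → (∀ r ∈ rs, n ≤ r.length) → n ≤ rs.foldl (fun m row => min m row.length) a := by
  induction rs with
  | nil => intro a n h _; simpa using h
  | cons hd tl ih =>
    intro a n h hall
    exact ih _ n (le_min h (hall hd (by simp))) (fun r hr => hall r (by simp [hr]))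

theorem pvMinLen_le_mem (rows : List (List String)) (r : List String) (hr : r ∈ rows) : pvMinLen rows ≤ r.length := by
  cases rows with
  | nil => cases hr
  | cons hd tl =>
    rcases List.mem_cons.mp hr with h | h
    · subst h; exact pvFoldMin_le_init tl _
    · exact pvFoldMin_le_mem tl _ r h

theorem pvMinLen_ge (rows : List (List String)) (n : Nat) (hne : rows ≠ []) (hall : ∀ r ∈ rows, n ≤ r.length) : n ≤ pvMinLen rows := by
  cases rows with
  | nil => exact absurd rfl hne
  | cons hd tl => exact pvFoldMin_ge tl _ n (hall hd (by simp)) (fun r hr => hall r (by simp [hr]))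

theorem pvMinLen_reverse (rows : List (List String)) : pvMinLen rows.reverse = pvMinLen rows := by
  cases rows with
  | nil => rfl
  | cons hd tl =>
    apply Nat.le_antisymm
    · apply pvMinLen_ge _ _ (by simp)
      intro r hr
      exact pvMinLen_le_mem _ r (List.mem_reverse.mpr hr)
    · apply pvMinLen_ge _ _ (by simp)
      intro r hr
      exact pvMinLen_le_mem _ r (List.mem_reverse.mp hr)

theorem pvMinLen_const (rows : List (List String)) (L : Nat) (hne : rows ≠ []) (hall : ∀ r ∈ rows, r.length = L) : pvMinLen rows = L := by
  cases rows with
  | nil => exact absurd rfl hne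
  | cons hd tl =>
    apply Nat.le_antisymm
    · have := pvMinLen_le_mem (hd :: tl) hd (by simp)
      simpa [hall hd (by simp)] using this
    · exact pvMinLen_ge _ _ (by simp) (fun r hr => (hall r hr).ge)

-- getD facts
theorem pvGetD_range_map (n i : Nat) (f : Nat → List String) (h : i < n) :
    ((List.range n).map f).getD i [] = f i := by
  simp [List.getD, h]

theorem pvGetD_map_getD (rows : List (List String)) (j i : Nat) (h : j < rows.length) :
    ((rows.map (fun row => row.getD i "")).getD j "") = ((rows.getD j []).getD i "") := by
  simp [List.getD, List.getElem?_map, List.getElem?_eq_getElem h]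

theorem pvZipStar_cell (rows : List (List String)) (i j : Nat) (hi : i < pvMinLen rows) (hj : j < rows.length) :
    ((pyZipStar rows).getD i []).getD j "" = (rows.getD j []).getD i "" := by
  unfold pyZipStar
  rw [pvGetD_range_map _ _ _ hi, pvGetD_map_getD _ _ _ hj]

theorem pvZipStar_length (rows : List (List String)) : (pyZipStar rows).length = pvMinLen rows := by
  simp [pyZipStar]

theorem pvZipStar_mem_length (rows : List (List String)) (r : List String) (hr : r ∈ pyZipStar rows) : r.length = rows.length := by
  unfold pyZipStar at hr
  rcases List.mem_map.mp hr with ⟨j, _, rfl⟩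
  simp

theorem pvGetD_reverse (l : List (List String)) (j : Nat) (h : j < l.length) :
    l.reverse.getD j [] = l.getD (l.length - 1 - j) [] := by
  have h' : j < l.reverse.length := by simpa using h
  have h'' : l.length - 1 - j < l.length := by omega
  rw [List.getD_eq_getElem l.reverse _ h', List.getD_eq_getElem l _ h'', List.getElem_reverse]

-- per-rotation shape and cell characterisation, under the grille part of Pre_
theorem pvRot1_length (cg : List (List String)) : (rotA cg).length = pvMinLen cg := by
  rw [show rotA cg = pyZipStar cg.reverse from rfl, pvZipStar_length, pvMinLen_reverse]

theorem pvRot1_rows (cg : List (List String)) (r : List String) (hr : r ∈ rotA cg) : r.length = cg.length := by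
  have := pvZipStar_mem_length cg.reverse r hr
  simpa using this

theorem pvCell1 (cg : List (List String)) (i u : Nat) (hi : i < pvMinLen cg) (hu : u < cg.length) :
    ((rotA cg).getD i []).getD u "" = (cg.getD (cg.length - 1 - u) []).getD i "" := by
  rw [show rotA cg = pyZipStar cg.reverse from rfl, pvZipStar_cell cg.reverse i u (by rwa [pvMinLen_reverse]) (by simpa using hu),
    pvGetD_reverse cg u hu]

theorem pvRot2_length (cg : List (List String)) (h1 : 4 ≤ pvMinLen cg) : (rotA (rotA cg)).length = cg.length := by
  rw [show rotA (rotA cg) = pyZipStar (rotA cg).reverse from rfl, pvZipStar_length, pvMinLen_reverse]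
  apply pvMinLen_const _ _ (by
    intro hnil
    have := pvRot1_length cg
    rw [hnil] at this
    simp at this
    omega)
  exact fun r hr => pvRot1_rows cg r hr

theorem pvCell2 (cg : List (List String)) (i u : Nat) (h1 : 4 ≤ pvMinLen cg)
    (hi : i < cg.length) (hu : u < pvMinLen cg) :
    ((rotA (rotA cg)).getD i []).getD u "" = (cg.getD (cg.length - 1 - i) []).getD (pvMinLen cg - 1 - u) "" := by
  have hminrev : pvMinLen (rotA cg).reverse = cg.length := by
    rw [pvMinLen_reverse]
    apply pvMinLen_const _ _ (by
      intro hnil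
      have := pvRot1_length cg
      rw [hnil] at this
      simp at this
      omega)
    exact fun r hr => pvRot1_rows cg r hr
  rw [show rotA (rotA cg) = pyZipStar (rotA cg).reverse from rfl, pvZipStar_cell (rotA cg).reverse i u (by rwa [hminrev]) (by simp [pvRot1_length]; omega),
    pvGetD_reverse (rotA cg) u (by rw [pvRot1_length]; omega), pvRot1_length,
    pvCell1 cg (pvMinLen cg - 1 - u) i (by omega) hi]

theorem pvCell3 (cg : List (List String)) (i u : Nat) (h0 : 4 ≤ cg.length) (h1 : 4 ≤ pvMinLen cg)
    (hi : i < pvMinLen cg) (hu : u < cg.length) :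
    ((rotA (rotA (rotA cg))).getD i []).getD u "" = (cg.getD u []).getD (pvMinLen cg - 1 - i) "" := by
  have hlen2 : (rotA (rotA cg)).length = cg.length := pvRot2_length cg h1
  have hrows2 : ∀ r ∈ rotA (rotA cg), r.length = pvMinLen cg := by
    intro r hr
    have := pvZipStar_mem_length (rotA cg).reverse r hr
    simpa [pvRot1_length] using this
  have hne2 : rotA (rotA cg) ≠ [] := by
    intro hnil; rw [hnil] at hlen2; simp at hlen2; omega
  have hminrev : pvMinLen (rotA (rotA cg)).reverse = pvMinLen cg := by
    rw [pvMinLen_reverse]; exact pvMinLen_const _ _ hne2 hrows2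
  rw [show rotA (rotA (rotA cg)) = pyZipStar (rotA (rotA cg)).reverse from rfl, pvZipStar_cell (rotA (rotA cg)).reverse i u (by rwa [hminrev]) (by simpa [hlen2] using hu),
    pvGetD_reverse (rotA (rotA cg)) u (by rwa [hlen2]), hlen2,
    pvCell2 cg (cg.length - 1 - u) i h1 (by omega) hi]
  congr 2
  omega

-- round chunks: A's inner double loop over a grid g, and B's over the original grille through a coordinate map
def pvChunkA (g cp : List (List String)) (l : String) : String :=
  (List.range 4).foldl (fun l i =>
    (List.range 4).foldl (fun l u =>
      if ((g.getD i []).getD u "") == "X" then l ++ ((cp.getD i []).getD u "") else l) l) l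

def pvChunkB (x cp : List (List String)) (f : Nat → Nat → Nat × Nat) (l : String) : String :=
  (List.range 4).foldl (fun l i =>
    (List.range 4).foldl (fun l u =>
      if ((x.getD (f i u).1 []).getD (f i u).2 "") == "X" then l ++ ((cp.getD i []).getD u "") else l) l) l

theorem pvChunk_eq (g x cp : List (List String)) (f : Nat → Nat → Nat × Nat)
    (h : ∀ i, i < 4 → ∀ u, u < 4 → ((g.getD i []).getD u "") = ((x.getD (f i u).1 []).getD (f i u).2 "")) :
    ∀ l, pvChunkA g cp l = pvChunkB x cp f l := by
  intro l
  unfold pvChunkA pvChunkB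
  apply PySem.List.foldl_congr_mem'
  intro i hi acc
  apply PySem.List.foldl_congr_mem'
  intro u hu acc'
  rw [h i (List.mem_range.mp hi) u (List.mem_range.mp hu)]

set_option maxHeartbeats 2000000 in
theorem pvA_eq (cg cp : List (List String)) :
    recall_password cg cp =
      pvChunkA (rotA (rotA (rotA cg))) cp (pvChunkA (rotA (rotA cg)) cp (pvChunkA (rotA cg) cp (pvChunkA cg cp ""))) := rfl

set_option maxHeartbeats 2000000 in
theorem pvB_eq (cg cp : List (List String)) :
    recall_password_alt cg cp =
      pvChunkB cg cp (fun i u => (cg.length - 1 - (cg.length - 1 - u), pvMinLen cg - 1 - i)) (pvChunkB cg cp (fun i u => (cg.length - 1 - i, pvMinLen cg - 1 - u)) (pvChunkB cg cp (fun i u => (cg.length - 1 - u, i)) (pvChunkB cg cp (fun i u => (i, u)) ""))) := rfl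

-- ===== VERDICT (by name: the statement is the Claim_ definition above) =====
theorem recall_password_spec : Claim_equal_recall_password := by
  intro cg cp _hDom hPre
  unfold Spec_recall_password
  obtain ⟨h0, hrows, _⟩ := hPre
  have h1 : 4 ≤ pvMinLen cg := pvMinLen_ge cg 4 (by intro hnil; rw [hnil] at h0; simp at h0) hrows
  rw [pvA_eq, pvB_eq]
  rw [pvChunk_eq cg cg cp (fun i u => (i, u)) (by intro i _ u _; rfl),
    pvChunk_eq (rotA cg) cg cp (fun i u => (cg.length - 1 - u, i))
      (by intro i hi u hu; exact pvCell1 cg i u (by omega) (by omega)),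
    pvChunk_eq (rotA (rotA cg)) cg cp (fun i u => (cg.length - 1 - i, pvMinLen cg - 1 - u))
      (by intro i hi u hu; exact pvCell2 cg i u h1 (by omega) (by omega)),
    pvChunk_eq (rotA (rotA (rotA cg))) cg cp (fun i u => (cg.length - 1 - (cg.length - 1 - u), pvMinLen cg - 1 - i))
      (by intro i hi u hu
          have he : cg.length - 1 - (cg.length - 1 - u) = u := by omega
          simp only [he]
          exact pvCell3 cg i u h0 h1 (by omega) (by omega))]
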